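-- pv_equiv track=rewrite | github.com/ashleyalmeida07/Rural_care | cancer_detection/outcome_predictor.py | _get_side_effect_management
-- ===== SOURCE A (Python) =====
-- from typing import Dict, List, Optional
--
-- def _get_side_effect_management(side_effects: List[Dict]) -> List[str]:
--     """Get management recommendations"""
--     recommendations = []
--
--     severe_effects = [se for se in side_effects if se.get('severity') == 'severe']
--     if severe_effects:
--         recommendations.append('Proactive monitoring for severe side effects recommended')
--         recommendations.append('Consider pre-medication and supportive care')
--
--     if any('Nausea' in se.get('name', '') for se in side_effects):
--         recommendations.append('Antiemetic prophylaxis recommended')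
--
--     if any('Bone Marrow' in se.get('name', '') for se in side_effects):
--         recommendations.append('Regular CBC monitoring required')
--
--     return recommendations
-- ===== SOURCE B (Python) =====
-- _RULES = [
--     (lambda se: se.get('severity') == 'severe',
--      ['Proactive monitoring for severe side effects recommended',
--       'Consider pre-medication and supportive care']),
--     (lambda se: 'Nausea' in se.get('name', ''),
--      ['Antiemetic prophylaxis recommended']),
--     (lambda se: 'Bone Marrow' in se.get('name', ''),
--      ['Regular CBC monitoring required']),
-- ]
--
--
-- def _get_side_effect_management(side_effects):
--     """Table-driven: one pass collecting the set of triggered rule indices,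
--     then emit the messages of the triggered rules in table order."""
--     triggered = set()
--     for se in side_effects:
--         for i, (pred, _msgs) in enumerate(_RULES):
--             if pred(se):
--                 triggered.add(i)
--     out = []
--     for i, (_pred, msgs) in enumerate(_RULES):
--         if i in triggered:
--             out.extend(msgs)
--     return out
-- ===== Notes on version B (the rewrite author's own statement) =====
-- stated objective: alternative
-- what changed: Replaced A's three hard-coded scans and appends with a data-driven design: a rule table of (predicate, messages) pairs, one pass over side_effects collecting the set of triggered rule indices, then a loop over the table emitting the messages of triggered rules in table order.
import Mathlib
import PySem

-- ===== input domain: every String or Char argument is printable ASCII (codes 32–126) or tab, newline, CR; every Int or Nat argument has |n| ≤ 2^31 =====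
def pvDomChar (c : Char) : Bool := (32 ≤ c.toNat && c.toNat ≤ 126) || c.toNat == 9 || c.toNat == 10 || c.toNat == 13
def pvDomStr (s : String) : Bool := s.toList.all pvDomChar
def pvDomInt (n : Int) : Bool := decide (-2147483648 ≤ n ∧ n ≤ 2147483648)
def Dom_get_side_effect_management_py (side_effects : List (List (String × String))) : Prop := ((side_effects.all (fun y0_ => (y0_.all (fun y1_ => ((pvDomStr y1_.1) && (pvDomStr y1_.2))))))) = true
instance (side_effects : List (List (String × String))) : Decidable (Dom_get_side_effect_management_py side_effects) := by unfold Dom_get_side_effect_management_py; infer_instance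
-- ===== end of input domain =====

-- B is table-driven: a rule table (predicate, messages) and one pass collecting the set
-- of triggered rule indices, then the messages of triggered rules in table order
-- (alternative decomposition, not claimed faster).

-- ===== PORT A =====
-- A, step for step: filter the severe effects, then two any() scans, appending in order.
def get_side_effect_management_py (side_effects : List (List (String × String))) : List String :=
  let recommendations : List String := []
  let severe_effects := side_effects.filter
    (fun se => (PySem.Dict.mk se).get? "severity" == some "severe")
  let recommendations := if severe_effects.isEmpty then recommendations
    else recommendations ++ ["Proactive monitoring for severe side effects recommended",
                             "Consider pre-medication and supportive care"]
  let recommendations := if side_effects.any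
      (fun se => PySem.Str.isIn "Nausea" ((PySem.Dict.mk se).getD "name" "")) then
    recommendations ++ ["Antiemetic prophylaxis recommended"] else recommendations
  let recommendations := if side_effects.any
      (fun se => PySem.Str.isIn "Bone Marrow" ((PySem.Dict.mk se).getD "name" "")) then
    recommendations ++ ["Regular CBC monitoring required"] else recommendations
  recommendations

-- ===== PORT B =====
-- Source B's module-level rule table _RULES.
def pvRules : List ((List (String × String) → Bool) × List String) :=
  [ (fun se => (PySem.Dict.mk se).get? "severity" == some "severe",
     ["Proactive monitoring for severe side effects recommended",
      "Consider pre-medication and supportive care"]),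
    (fun se => PySem.Str.isIn "Nausea" ((PySem.Dict.mk se).getD "name" ""),
     ["Antiemetic prophylaxis recommended"]),
    (fun se => PySem.Str.isIn "Bone Marrow" ((PySem.Dict.mk se).getD "name" ""),
     ["Regular CBC monitoring required"]) ]

-- B, step for step: the pass filling the `triggered` set of rule indices, then the
-- output loop over the enumerated table extending by the messages of triggered rules.
def get_side_effect_management_py_alt (side_effects : List (List (String × String))) : List String :=
  let triggered : PySem.Set Int := side_effects.foldl
    (fun t se => (PySem.List.enumerate pvRules).foldl
      (fun t ir => if ir.2.1 se then PySem.Set.add t ir.1 else t) t)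
    PySem.Set.empty
  (PySem.List.enumerate pvRules).foldl
    (fun out ir => if PySem.Set.contains triggered ir.1 then out ++ ir.2.2 else out) []

-- ===== PRECONDITION & SPEC =====
def Spec_get_side_effect_management_py (side_effects : List (List (String × String))) (out : List String) : Prop := out = get_side_effect_management_py_alt side_effects
instance (side_effects : List (List (String × String))) (out : List String) : Decidable (Spec_get_side_effect_management_py side_effects out) := by unfold Spec_get_side_effect_management_py; infer_instance

-- ===== CLAIM (what is proved, stated in full; the proofs are below) =====
def Claim_equal_get_side_effect_management_py : Prop := ∀ (side_effects : List (List (String × String))), Dom_get_side_effect_management_py side_effects → Spec_get_side_effect_management_py side_effects (get_side_effect_management_py side_effects)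

-- ===== LEMMAS AND PROOFS =====

-- Membership in the triggered-index set built by B's first pass = the three any's.
theorem pv_mem_trigger (p0 p1 p2 : List (String × String) → Bool)
    (xs : List (List (String × String))) (t : PySem.Set Int) (k : Int) :
    k ∈ xs.foldl (fun t se =>
        (if p2 se then PySem.Set.add
          (if p1 se then PySem.Set.add
            (if p0 se then PySem.Set.add t 0 else t) 1
           else (if p0 se then PySem.Set.add t 0 else t)) 2
         else (if p1 se then PySem.Set.add
            (if p0 se then PySem.Set.add t 0 else t) 1
           else (if p0 se then PySem.Set.add t 0 else t)))) t ↔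
      k ∈ t ∨ (k = 0 ∧ xs.any p0) ∨ (k = 1 ∧ xs.any p1) ∨ (k = 2 ∧ xs.any p2) := by
  induction xs generalizing t with
  | nil => simp
  | cons x xs ih =>
    rw [List.foldl_cons, ih]
    clear ih
    by_cases h0 : p0 x <;> by_cases h1 : p1 x <;> by_cases h2 : p2 x <;>
      simp [h0, h1, h2, PySem.Set.mem_add] <;> aesop

-- A's 'severe_effects is nonempty' test is an any.
theorem pv_filter_isEmpty (p : List (String × String) → Bool)
    (xs : List (List (String × String))) :
    (xs.filter p).isEmpty = !xs.any p := by
  induction xs with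
  | nil => simp
  | cons x t ih => by_cases h : p x <;> simp [h, ih]

-- ===== VERDICT (by name: the statement is the Claim_ definition above) =====
theorem get_side_effect_management_py_spec : Claim_equal_get_side_effect_management_py := by
  intro xs _
  unfold Spec_get_side_effect_management_py get_side_effect_management_py
    get_side_effect_management_py_alt
  simp only [pvRules, PySem.List.enumerate, List.foldl_cons, List.foldl_nil,
    pv_filter_isEmpty]
  have hmem := pv_mem_trigger
    (fun se => (PySem.Dict.mk se).get? "severity" == some "severe")
    (fun se => PySem.Str.isIn "Nausea" ((PySem.Dict.mk se).getD "name" ""))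
    (fun se => PySem.Str.isIn "Bone Marrow" ((PySem.Dict.mk se).getD "name" ""))
    xs PySem.Set.empty
  simp only [show (0:Int)+1 = 1 by norm_num, show (1:Int)+1 = 2 by norm_num]
  simp only [PySem.Set.contains_iff, hmem]
  cases hA0 : xs.any (fun se => (PySem.Dict.mk se).get? "severity" == some "severe") <;>
  cases hA1 : xs.any (fun se => PySem.Str.isIn "Nausea" ((PySem.Dict.mk se).getD "name" "")) <;>
  cases hA2 : xs.any (fun se => PySem.Str.isIn "Bone Marrow" ((PySem.Dict.mk se).getD "name" "")) <;>
    simp [hA0, hA1, hA2, PySem.Set.empty]
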